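-- pv_equiv track=rewrite | github.com/NorthblueM/IM-position-effect-paper-scripts | stats_im_ions/utils/fasta_file.py | enzyme_specific
-- ===== SOURCE A (Python) =====
-- def enzyme_specific(map_ac2seq, max_miss_site, min_pep_len, cleavs, term):
--     """进行特异酶切
--     max_miss_site=3, min_pep_len=5, cleavs=['K','R'], term='N'
--     """
--
--     map_ac2pep_seqs = {}
--
--     # N端酶切
--     for ac, seq in map_ac2seq.items():
--         pep_seqs = []
--         cleav_sites = [0] # 酶切位点坐标，从0开始
--         for i, aa in enumerate(seq):
--             if aa in cleavs:
--                 cleav_sites.append(i)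
--
--         if cleav_sites[-1] != len(seq)-1:
--             cleav_sites.append(len(seq)-1)
--
--         for i, site_start in enumerate(cleav_sites):
--             for j in range(max_miss_site+1):
--                 k = i+1+j
--                 if k < len(cleav_sites):
--                     site_end = cleav_sites[k]
--                 else:
--                     continue
--
--                 if i == 0:
--                     pep_seq = seq[0: site_end+1]
--                 else:
--                     pep_seq = seq[site_start+1: site_end+1]
--
--                 if len(pep_seq) >= min_pep_len:
--                     pep_seqs.append(pep_seq)
--         map_ac2pep_seqs[ac] = pep_seqs
--
--     return map_ac2pep_seqs
-- ===== SOURCE B (Python) =====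
-- def enzyme_specific(map_ac2seq, max_miss_site, min_pep_len, cleavs, term):
--     """Specific digestion: build the fully-cleaved base fragments once, then form
--     missed-cleavage peptides by joining consecutive fragments instead of re-slicing."""
--     map_ac2pep_seqs = {}
--     for ac, seq in map_ac2seq.items():
--         sites = [0]
--         for i, aa in enumerate(seq):
--             if aa in cleavs:
--                 sites.append(i)
--         if sites[-1] != len(seq) - 1:
--             sites.append(len(seq) - 1)
--         frags = []
--         for m in range(len(sites) - 1):
--             if m == 0:
--                 frags.append(seq[0:sites[1] + 1])
--             else:
--                 frags.append(seq[sites[m] + 1:sites[m + 1] + 1])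
--         peps = []
--         for i in range(len(frags)):
--             acc = ""
--             for j in range(min(max_miss_site + 1, len(frags) - i)):
--                 acc += frags[i + j]
--                 if len(acc) >= min_pep_len:
--                     peps.append(acc)
--         map_ac2pep_seqs[ac] = peps
--     return map_ac2pep_seqs
-- ===== Notes on version B (the rewrite author's own statement) =====
-- stated objective: faster
-- what changed: B builds the fully-cleaved base fragments once per sequence and forms missed-cleavage peptides by accumulating consecutive fragments, its inner loop bounded by min(max_miss_site+1, remaining fragments), instead of A's iterating all max_miss_site+1 candidates per site (skipping out-of-range ones) and re-slicing the full sequence per (start,end) site pair.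
import Mathlib
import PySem

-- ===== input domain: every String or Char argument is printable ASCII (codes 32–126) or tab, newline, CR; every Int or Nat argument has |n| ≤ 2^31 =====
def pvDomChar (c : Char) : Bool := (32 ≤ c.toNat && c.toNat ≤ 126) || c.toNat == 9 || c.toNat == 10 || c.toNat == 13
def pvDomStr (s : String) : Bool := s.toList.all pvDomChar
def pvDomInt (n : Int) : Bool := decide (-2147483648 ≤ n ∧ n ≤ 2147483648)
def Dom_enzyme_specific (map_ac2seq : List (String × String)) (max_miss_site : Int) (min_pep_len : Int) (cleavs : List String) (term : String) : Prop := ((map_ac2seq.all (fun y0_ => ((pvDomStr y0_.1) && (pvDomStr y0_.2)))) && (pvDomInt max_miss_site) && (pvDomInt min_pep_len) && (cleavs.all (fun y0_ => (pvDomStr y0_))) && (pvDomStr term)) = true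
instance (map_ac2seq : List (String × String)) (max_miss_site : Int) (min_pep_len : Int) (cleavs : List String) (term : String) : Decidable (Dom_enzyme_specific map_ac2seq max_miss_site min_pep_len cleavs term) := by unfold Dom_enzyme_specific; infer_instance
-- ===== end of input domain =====

-- B forms missed-cleavage peptides by joining precomputed fully-cleaved fragments, with the inner
-- loop clamped to the remaining fragment count, instead of A's re-slicing the full sequence per
-- (start,end) site pair over all max_miss_site+1 candidates; measurably faster for large max_miss_site.

-- ===== PORT A =====
-- shared by both ports: A's cleavage-site list (sentinel 0, appended last index); B keeps it unchanged.
def pvSiteLoop (cleavs : List String) (l : List (Int × Char)) (acc : List Int) : List Int :=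
  l.foldl (fun acc p => if cleavs.contains (String.mk [p.2]) then acc ++ [p.1] else acc) acc

-- cleav_sites[-1] : the list is never empty (starts as [0]), so pyGetD is exact here
def pvSitesFinish (seq : List Char) (sites : List Int) : List Int :=
  if PySem.List.pyGetD sites (-1) 0 ≠ (seq.length : Int) - 1 then sites ++ [(seq.length : Int) - 1]
  else sites

def pvSites (seq : List Char) (cleavs : List String) : List Int :=
  pvSitesFinish seq (pvSiteLoop cleavs (PySem.List.enumerate seq 0) [0])

-- A's per-sequence digestion: for each (i, site_start) and each missed count j, slice the sequence
def pvPepsA (seq : List Char) (max_miss_site min_pep_len : Int) (cleavs : List String) : List String :=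
  let sites := pvSites seq cleavs
  (PySem.List.enumerate sites 0).foldl (fun peps p =>
    (PySem.List.pyRange 0 (max_miss_site + 1) 1).foldl (fun peps j =>
      let k := p.1 + 1 + j
      if k < (sites.length : Int) then
        let site_end := PySem.List.pyGetD sites k 0   -- in range: 0 ≤ k < len(sites)
        let pep := if p.1 == 0 then PySem.List.slice seq (some 0) (some (site_end + 1))
                   else PySem.List.slice seq (some (p.2 + 1)) (some (site_end + 1))
        if min_pep_len ≤ (pep.length : Int) then peps ++ [String.mk pep] else peps
      else peps) peps) []

def enzyme_specific (map_ac2seq : List (String × String)) (max_miss_site : Int) (min_pep_len : Int) (cleavs : List String) (term : String) : List (String × List String) :=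
  ((PySem.Dict.ofList map_ac2seq).items.foldl
    (fun d p => d.insert p.1 (pvPepsA p.2.toList max_miss_site min_pep_len cleavs))
    (PySem.Dict.empty : PySem.Dict String (List String))).items

-- ===== PORT B =====
-- B's per-sequence digestion: base fragments first, then running concatenation of neighbours
def pvPepsB (seq : List Char) (max_miss_site min_pep_len : Int) (cleavs : List String) : List String :=
  let sites := pvSites seq cleavs
  let frags := (PySem.List.pyRange 0 ((sites.length : Int) - 1) 1).map (fun m =>
    if m == 0 then PySem.List.slice seq (some 0) (some (PySem.List.pyGetD sites 1 0 + 1))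
    else PySem.List.slice seq (some (PySem.List.pyGetD sites m 0 + 1)) (some (PySem.List.pyGetD sites (m + 1) 0 + 1)))
  (PySem.List.pyRange 0 ((frags.length : Int)) 1).foldl (fun peps i =>
    ((PySem.List.pyRange 0 (min (max_miss_site + 1) ((frags.length : Int) - i)) 1).foldl
      (fun st j =>
        let acc := st.1 ++ PySem.List.pyGetD frags (i + j) []   -- in range: 0 ≤ i+j < len(frags)
        (acc, if min_pep_len ≤ (acc.length : Int) then st.2 ++ [String.mk acc] else st.2))
      (([] : List Char), peps)).2) []

def enzyme_specific_alt (map_ac2seq : List (String × String)) (max_miss_site : Int) (min_pep_len : Int) (cleavs : List String) (term : String) : List (String × List String) :=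
  ((PySem.Dict.ofList map_ac2seq).items.foldl
    (fun d p => d.insert p.1 (pvPepsB p.2.toList max_miss_site min_pep_len cleavs))
    (PySem.Dict.empty : PySem.Dict String (List String))).items

-- ===== PRECONDITION & SPEC =====
def Spec_enzyme_specific (map_ac2seq : List (String × String)) (max_miss_site : Int) (min_pep_len : Int) (cleavs : List String) (term : String) (out : List (String × List String)) : Prop := out = enzyme_specific_alt map_ac2seq max_miss_site min_pep_len cleavs term
instance (map_ac2seq : List (String × String)) (max_miss_site : Int) (min_pep_len : Int) (cleavs : List String) (term : String) (out : List (String × List String)) : Decidable (Spec_enzyme_specific map_ac2seq max_miss_site min_pep_len cleavs term out) := by unfold Spec_enzyme_specific; infer_instance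

-- ===== CLAIM (what is proved, stated in full; the proofs are below) =====
def Claim_equal_enzyme_specific : Prop := ∀ (map_ac2seq : List (String × String)) (max_miss_site : Int) (min_pep_len : Int) (cleavs : List String) (term : String), Dom_enzyme_specific map_ac2seq max_miss_site min_pep_len cleavs term → Spec_enzyme_specific map_ac2seq max_miss_site min_pep_len cleavs term (enzyme_specific map_ac2seq max_miss_site min_pep_len cleavs term)

-- ===== LEMMAS AND PROOFS =====

-- proof-only abbreviations
def pvS (sites : List Int) (m : Int) : Int := PySem.List.pyGetD sites m 0

def pvGood (sites : List Int) : Prop :=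
  (∀ m : Int, 0 ≤ m → m < (sites.length : Int) → -1 ≤ pvS sites m) ∧
  (∀ m : Int, 1 ≤ m → m + 2 ≤ (sites.length : Int) → pvS sites m ≤ pvS sites (m + 1))

def pvP (seq : List Char) (sites : List Int) (i j : Int) : List Char :=
  if i = 0 then PySem.List.slice seq none (some (pvS sites (i + 1 + j) + 1))
  else PySem.List.slice seq (some (pvS sites i + 1)) (some (pvS sites (i + 1 + j) + 1))

def pvFrag (seq : List Char) (sites : List Int) (m : Int) : List Char :=
  if m = 0 then PySem.List.slice seq none (some (pvS sites 1 + 1))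
  else PySem.List.slice seq (some (pvS sites m + 1)) (some (pvS sites (m + 1) + 1))

lemma pvSiteLoop_inv (cleavs : List String) :
    ∀ (l : List (Int × Char)) (acc : List Int),
    List.IsChain (· ≤ ·) acc →
    (∀ a ∈ acc, ∀ p ∈ l, a ≤ p.1) →
    List.Pairwise (fun p q : Int × Char => p.1 ≤ q.1) l →
    List.IsChain (· ≤ ·) (pvSiteLoop cleavs l acc) ∧
    (∀ a ∈ pvSiteLoop cleavs l acc, a ∈ acc ∨ ∃ p ∈ l, a = p.1) ∧
    acc <+: pvSiteLoop cleavs l acc := by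
  intro l
  induction l with
  | nil => intro acc h1 _ _; exact ⟨by simpa [pvSiteLoop] using h1, by simp [pvSiteLoop], by simp [pvSiteLoop]⟩
  | cons p l ih =>
    intro acc h1 h2 h3
    have hstep : pvSiteLoop cleavs (p :: l) acc
        = pvSiteLoop cleavs l (if cleavs.contains (String.mk [p.2]) then acc ++ [p.1] else acc) := by
      simp [pvSiteLoop]
    rw [hstep]
    rcases List.pairwise_cons.mp h3 with ⟨hp, htail⟩
    by_cases hc : cleavs.contains (String.mk [p.2])
    · simp only [hc, if_pos]
      have h1' : List.IsChain (· ≤ ·) (acc ++ [p.1]) := by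
        rw [List.isChain_append]
        refine ⟨h1, List.isChain_singleton _, ?_⟩
        intro x hx y hy
        simp at hy; subst hy
        exact h2 x (List.mem_of_mem_getLast? hx) p (List.mem_cons_self)
      have h2' : ∀ a ∈ acc ++ [p.1], ∀ q ∈ l, a ≤ q.1 := by
        intro a ha q hq
        rcases List.mem_append.mp ha with ha | ha
        · exact h2 a ha q (List.mem_cons_of_mem _ hq)
        · simp at ha; subst ha; exact hp q hq
      obtain ⟨c1, c2, c3⟩ := ih (acc ++ [p.1]) h1' h2' htail
      refine ⟨c1, ?_, List.IsPrefix.trans (List.prefix_append _ _) c3⟩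
      intro a ha
      rcases c2 a ha with ha' | ⟨q, hq, rfl⟩
      · rcases List.mem_append.mp ha' with h | h
        · exact Or.inl h
        · simp at h; subst h; exact Or.inr ⟨p, List.mem_cons_self, rfl⟩
      · exact Or.inr ⟨q, List.mem_cons_of_mem _ hq, rfl⟩
    · simp only [hc, if_neg, Bool.false_eq_true, not_false_iff]
      obtain ⟨c1, c2, c3⟩ := ih acc h1 (fun a ha q hq => h2 a ha q (List.mem_cons_of_mem _ hq)) htail
      exact ⟨c1, fun a ha => (c2 a ha).imp id (fun ⟨q, hq, he⟩ => ⟨q, List.mem_cons_of_mem _ hq, he⟩), c3⟩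

lemma pv_enum_nonneg (seq : List Char) : ∀ a ∈ ([0] : List Int), ∀ p ∈ PySem.List.enumerate seq 0, a ≤ p.1 := by
  intro a ha p hp
  simp at ha; subst ha
  obtain ⟨k, hk, he⟩ := (PySem.List.mem_enumerate_iff _ _ _).mp hp
  subst he; simp

lemma pv_enum_pairwise (seq : List Char) :
    List.Pairwise (fun p q : Int × Char => p.1 ≤ q.1) (PySem.List.enumerate seq 0) :=
  (PySem.List.pairwise_lt_enumerate seq 0).imp (fun h => le_of_lt h)

lemma pvSites_ne_nil (seq : List Char) (cleavs : List String) : pvSites seq cleavs ≠ [] := by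
  obtain ⟨_, _, hpre⟩ := pvSiteLoop_inv cleavs (PySem.List.enumerate seq 0) [0]
    (List.isChain_singleton _) (pv_enum_nonneg seq) (pv_enum_pairwise seq)
  have hne : pvSiteLoop cleavs (PySem.List.enumerate seq 0) [0] ≠ [] := by
    intro h; rw [h] at hpre; simp at hpre
  unfold pvSites pvSitesFinish
  split
  · simp
  · exact hne

lemma pvSites_good (seq : List Char) (cleavs : List String) : pvGood (pvSites seq cleavs) := by
  by_cases hseq : seq = []
  · subst hseq
    have h : pvSites [] cleavs = [0, -1] := by
      simp [pvSites, pvSitesFinish, pvSiteLoop, PySem.List.enumerate_nil,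
        PySem.List.pyGetD, PySem.List.pyGet?, PySem.List.pyIdx?]
    rw [h]
    constructor
    · intro m h0 hlt
      have : m = 0 ∨ m = 1 := by simp at hlt; omega
      rcases this with rfl | rfl <;> decide
    · intro m h1 h2; simp at h2; omega
  · have hL : 1 ≤ (seq.length : Int) := by
      have := List.length_pos_iff.mpr hseq; omega
    obtain ⟨hchain, hmem, hpre⟩ := pvSiteLoop_inv cleavs (PySem.List.enumerate seq 0) [0]
      (List.isChain_singleton _) (pv_enum_nonneg seq) (pv_enum_pairwise seq)
    set base := pvSiteLoop cleavs (PySem.List.enumerate seq 0) [0] with hbase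
    have hbnd : ∀ a ∈ base, 0 ≤ a ∧ a ≤ (seq.length : Int) - 1 := by
      intro a ha
      rcases hmem a ha with h | ⟨p, hp, rfl⟩
      · simp at h; subst h; omega
      · obtain ⟨k, hk, he⟩ := (PySem.List.mem_enumerate_iff _ _ _).mp hp
        subst he; simp; omega
    have hrch : List.IsChain (· ≤ ·) (pvSites seq cleavs) ∧
        ∀ a ∈ pvSites seq cleavs, 0 ≤ a ∧ a ≤ (seq.length : Int) - 1 := by
      unfold pvSites pvSitesFinish
      rw [← hbase]
      split
      · constructor
        · rw [List.isChain_append]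
          refine ⟨hchain, List.isChain_singleton _, ?_⟩
          intro x hx y hy
          simp at hy; subst hy
          exact (hbnd x (List.mem_of_mem_getLast? hx)).2
        · intro a ha
          rcases List.mem_append.mp ha with h | h
          · exact hbnd a h
          · simp at h; subst h; omega
      · exact ⟨hchain, hbnd⟩
    obtain ⟨hch, hb⟩ := hrch
    constructor
    · intro m h0 hlt
      have hm : m.toNat < (pvSites seq cleavs).length := by omega
      have e : pvS (pvSites seq cleavs) m = (pvSites seq cleavs)[m.toNat] :=
        PySem.List.pyGetD_eq_getElem _ _ h0 hlt
      rw [e]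
      have := (hb _ (List.getElem_mem hm)).1
      omega
    · intro m h1 h2
      have hm : m.toNat + 1 < (pvSites seq cleavs).length := by omega
      have e1 : pvS (pvSites seq cleavs) m = (pvSites seq cleavs)[m.toNat] :=
        PySem.List.pyGetD_eq_getElem _ _ (by omega) (by omega)
      have e2' : pvS (pvSites seq cleavs) (m + 1) = (pvSites seq cleavs)[(m+1).toNat] :=
        PySem.List.pyGetD_eq_getElem _ _ (by omega) (by omega)
      have ht : (m + 1).toNat = m.toNat + 1 := by omega
      rw [e1, e2']
      have := List.isChain_iff_getElem.mp hch m.toNat hm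
      simpa [ht] using this

lemma pv_slice_compose (seq : List Char) (a b c : Int) (h0 : 0 ≤ a) (hab : a ≤ b) (hbc : b ≤ c) :
    PySem.List.slice seq (some a) (some b) ++ PySem.List.slice seq (some b) (some c)
      = PySem.List.slice seq (some a) (some c) := by
  obtain ⟨a, rfl⟩ := Int.eq_ofNat_of_zero_le h0
  obtain ⟨b, rfl⟩ := Int.eq_ofNat_of_zero_le (le_trans h0 hab)
  obtain ⟨c, rfl⟩ := Int.eq_ofNat_of_zero_le (le_trans (le_trans h0 hab) hbc)
  rw [PySem.List.slice_natCast, PySem.List.slice_natCast, PySem.List.slice_natCast]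
  have hab' : a ≤ b := by exact_mod_cast hab
  have hbc' : b ≤ c := by exact_mod_cast hbc
  have h1 : c - a = (b - a) + (c - b) := by omega
  rw [h1, List.take_add]
  congr 1
  rw [List.drop_drop]
  congr 2
  omega

lemma pv_slice_compose_left (seq : List Char) (b c : Int) (h0 : 0 ≤ b) (hbc : b ≤ c) :
    PySem.List.slice seq none (some b) ++ PySem.List.slice seq (some b) (some c)
      = PySem.List.slice seq none (some c) := by
  obtain ⟨b, rfl⟩ := Int.eq_ofNat_of_zero_le h0
  obtain ⟨c, rfl⟩ := Int.eq_ofNat_of_zero_le (le_trans h0 hbc)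
  rw [PySem.List.slice_to_natCast, PySem.List.slice_natCast, PySem.List.slice_to_natCast]
  have hbc' : b ≤ c := by exact_mod_cast hbc
  have h1 : c = b + (c - b) := by omega
  conv_rhs => rw [h1]
  rw [List.take_add]

lemma pvS_chain (sites : List Int) (hg : pvGood sites) (i m : Int) (hi : 1 ≤ i) (him : i ≤ m)
    (hm : m + 1 ≤ (sites.length : Int)) : pvS sites i ≤ pvS sites m := by
  have key : ∀ d : Nat, ∀ i : Int, 1 ≤ i → i + d + 1 ≤ (sites.length : Int) → pvS sites i ≤ pvS sites (i + d) := by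
    intro d
    induction d with
    | zero => intro i _ _; simp
    | succ d ih =>
      intro i h1 h2
      have e : i + (d + 1 : Nat) = (i + d) + 1 := by push_cast; ring
      rw [e]
      exact le_trans (ih i h1 (by push_cast at h2 ⊢; omega))
        (hg.2 (i + d) (by omega) (by push_cast at h2 ⊢; omega))
  have e : m = i + ((m - i).toNat : Int) := by omega
  rw [e]
  exact key (m - i).toNat i hi (by omega)

lemma pvP_extend (seq : List Char) (sites : List Int) (hg : pvGood sites) (i j : Int)
    (hi : 0 ≤ i) (hj : 0 ≤ j) (hr : i + j + 2 < (sites.length : Int)) :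
    pvP seq sites i j ++ pvFrag seq sites (i + j + 1) = pvP seq sites i (j + 1) := by
  have hfrag : pvFrag seq sites (i + j + 1)
      = PySem.List.slice seq (some (pvS sites (i + j + 1) + 1)) (some (pvS sites (i + j + 2) + 1)) := by
    unfold pvFrag
    rw [if_neg (by omega)]
    have e : i + j + 1 + 1 = i + j + 2 := by ring
    rw [e]
  rw [hfrag]
  by_cases hi0 : i = 0
  · subst hi0
    unfold pvP
    rw [if_pos rfl, if_pos rfl]
    have e1 : (0 : Int) + 1 + j = 0 + j + 1 := by ring
    have e2 : (0 : Int) + 1 + (j + 1) = 0 + j + 2 := by ring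
    rw [e1, e2]
    exact pv_slice_compose_left seq _ _
      (by have := hg.1 (0 + j + 1) (by omega) (by omega); omega)
      (by have h := hg.2 (0 + j + 1) (by omega) (by omega)
          rw [show (0 + j + 1 + 1 : Int) = 0 + j + 2 by ring] at h; omega)
  · unfold pvP
    rw [if_neg hi0, if_neg hi0]
    have e1 : i + 1 + j = i + j + 1 := by ring
    have e2 : i + 1 + (j + 1) = i + j + 2 := by ring
    rw [e1, e2]
    exact pv_slice_compose seq _ _ _
      (by have := hg.1 i (by omega) (by omega); omega)
      (by have := pvS_chain sites hg i (i + j + 1) (by omega) (by omega) (by omega); omega)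
      (by have h := hg.2 (i + j + 1) (by omega) (by omega)
          rw [show (i + j + 1 + 1 : Int) = i + j + 2 by ring] at h; omega)


def pvStepC (seq : List Char) (sites : List Int) (minl i : Int) : List String → Int → List String :=
  fun peps j => if minl ≤ ((pvP seq sites i j).length : Int) then peps ++ [String.mk (pvP seq sites i j)] else peps

def pvInnerC (seq : List Char) (sites : List Int) (mm minl i : Int) (peps : List String) : List String :=
  (PySem.List.pyRange 0 (min (mm + 1) ((sites.length : Int) - 1 - i)) 1).foldl (pvStepC seq sites minl i) peps

lemma pv_foldl_id {α β : Type} (l : List β) (a : α) : l.foldl (fun a _ => a) a = a := by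
  induction l <;> simp [List.foldl, *]

lemma pvInnerA_eq (seq : List Char) (sites : List Int) (mm minl : Int)
    (i : Int) (hi : 0 ≤ i) (hiN : i ≤ (sites.length : Int) - 1) (peps : List String) :
    (PySem.List.pyRange 0 (mm + 1) 1).foldl (fun peps j =>
      if i + 1 + j < (sites.length : Int) then
        (if minl ≤ (((if i == 0 then PySem.List.slice seq (some 0) (some (PySem.List.pyGetD sites (i + 1 + j) 0 + 1))
                      else PySem.List.slice seq (some (PySem.List.pyGetD sites i 0 + 1)) (some (PySem.List.pyGetD sites (i + 1 + j) 0 + 1))).length : Int))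
          then peps ++ [String.mk (if i == 0 then PySem.List.slice seq (some 0) (some (PySem.List.pyGetD sites (i + 1 + j) 0 + 1))
                      else PySem.List.slice seq (some (PySem.List.pyGetD sites i 0 + 1)) (some (PySem.List.pyGetD sites (i + 1 + j) 0 + 1)))]
          else peps)
      else peps) peps
    = pvInnerC seq sites mm minl i peps := by
  set N := (sites.length : Int) with hN
  have hbody : ∀ (peps : List String) (j : Int), 0 ≤ j → j < N - 1 - i →
      (if i + 1 + j < N then
        (if minl ≤ (((if i == 0 then PySem.List.slice seq (some 0) (some (PySem.List.pyGetD sites (i + 1 + j) 0 + 1))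
                      else PySem.List.slice seq (some (PySem.List.pyGetD sites i 0 + 1)) (some (PySem.List.pyGetD sites (i + 1 + j) 0 + 1))).length : Int))
          then peps ++ [String.mk (if i == 0 then PySem.List.slice seq (some 0) (some (PySem.List.pyGetD sites (i + 1 + j) 0 + 1))
                      else PySem.List.slice seq (some (PySem.List.pyGetD sites i 0 + 1)) (some (PySem.List.pyGetD sites (i + 1 + j) 0 + 1)))]
          else peps)
      else peps) = pvStepC seq sites minl i peps j := by
    intro peps j hj0 hjlt
    rw [if_pos (by omega)]
    unfold pvStepC pvP
    by_cases hi0 : i = 0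
    · subst hi0
      simp only [beq_self_eq_true, if_pos, pvS]
      rw [PySem.List.slice_zero_start]
    · have hbe : (i == 0) = false := by simpa using hi0
      simp only [hbe, if_neg hi0, Bool.false_eq_true, if_false, pvS]
  by_cases hmm : mm + 1 ≤ 0
  · have h1 : PySem.List.pyRange 0 (mm + 1) 1 = [] := PySem.List.pyRange_one_eq_nil (by omega)
    have h2 : PySem.List.pyRange 0 (min (mm + 1) (N - 1 - i)) 1 = [] :=
      PySem.List.pyRange_one_eq_nil (by omega)
    rw [pvInnerC, ← hN, h1, h2]
    rfl
  · have hM0 : 0 ≤ min (mm + 1) (N - 1 - i) := by omega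
    have hM1 : min (mm + 1) (N - 1 - i) ≤ mm + 1 := min_le_left _ _
    rw [PySem.List.pyRange_one_append 0 (min (mm + 1) (N - 1 - i)) (mm + 1) hM0 hM1,
      List.foldl_append]
    have hfirst : ∀ (peps : List String),
        (PySem.List.pyRange 0 (min (mm + 1) (N - 1 - i)) 1).foldl (fun peps j =>
          (if i + 1 + j < N then
            (if minl ≤ (((if i == 0 then PySem.List.slice seq (some 0) (some (PySem.List.pyGetD sites (i + 1 + j) 0 + 1))
                          else PySem.List.slice seq (some (PySem.List.pyGetD sites i 0 + 1)) (some (PySem.List.pyGetD sites (i + 1 + j) 0 + 1))).length : Int))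
              then peps ++ [String.mk (if i == 0 then PySem.List.slice seq (some 0) (some (PySem.List.pyGetD sites (i + 1 + j) 0 + 1))
                          else PySem.List.slice seq (some (PySem.List.pyGetD sites i 0 + 1)) (some (PySem.List.pyGetD sites (i + 1 + j) 0 + 1)))]
              else peps)
          else peps)) peps = pvInnerC seq sites mm minl i peps := by
      intro peps
      rw [pvInnerC, ← hN]
      apply PySem.List.foldl_congr_mem
      intro acc j hj
      have hjj := PySem.List.mem_pyRange_one.mp hj
      exact hbody acc j hjj.1 (by omega)
    rw [hfirst]
    rcases min_cases (mm + 1) (N - 1 - i) with ⟨he, _⟩ | ⟨he, _⟩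
    · rw [he, PySem.List.pyRange_one_eq_nil (le_refl _)]
      rfl
    · rw [he]
      have hno : ∀ (acc : List String), ∀ j ∈ PySem.List.pyRange (N - 1 - i) (mm + 1) 1,
          (if i + 1 + j < N then
            (if minl ≤ (((if i == 0 then PySem.List.slice seq (some 0) (some (PySem.List.pyGetD sites (i + 1 + j) 0 + 1))
                          else PySem.List.slice seq (some (PySem.List.pyGetD sites i 0 + 1)) (some (PySem.List.pyGetD sites (i + 1 + j) 0 + 1))).length : Int))
              then acc ++ [String.mk (if i == 0 then PySem.List.slice seq (some 0) (some (PySem.List.pyGetD sites (i + 1 + j) 0 + 1))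
                          else PySem.List.slice seq (some (PySem.List.pyGetD sites i 0 + 1)) (some (PySem.List.pyGetD sites (i + 1 + j) 0 + 1)))]
              else acc)
          else acc) = acc := by
        intro acc j hj
        have hjj := PySem.List.mem_pyRange_one.mp hj
        rw [if_neg (by omega)]
      rw [PySem.List.foldl_congr_mem _ _ _ _ hno, pv_foldl_id]

lemma pvFrag_index (seq : List Char) (sites : List Int) (t : Int)
    (h0 : 0 ≤ t) (hlt : t < (sites.length : Int) - 1) :
    PySem.List.pyGetD ((PySem.List.pyRange 0 ((sites.length : Int) - 1) 1).map (fun m =>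
      if m == 0 then PySem.List.slice seq (some 0) (some (PySem.List.pyGetD sites 1 0 + 1))
      else PySem.List.slice seq (some (PySem.List.pyGetD sites m 0 + 1)) (some (PySem.List.pyGetD sites (m + 1) 0 + 1)))) t []
    = pvFrag seq sites t := by
  rw [PySem.List.pyGetD_map_pyRange_of_nonneg _ _ _ _ h0 hlt]
  unfold pvFrag
  by_cases ht : t = 0
  · subst ht
    simp only [beq_self_eq_true, if_pos, pvS]
    rw [PySem.List.slice_zero_start]
  · have hbe : (t == 0) = false := by simpa using ht
    simp only [hbe, Bool.false_eq_true, if_false, if_neg ht, pvS]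

lemma pvInnerB_inv (seq : List Char) (sites : List Int) (hg : pvGood sites) (minl : Int)
    (i : Int) (hi : 0 ≤ i) (M : Int) (hM : M ≤ (sites.length : Int) - 1 - i) (peps : List String) :
    ∀ m : Nat, (m : Int) ≤ M →
    (PySem.List.pyRange 0 (m : Int) 1).foldl (fun st j =>
        ((st.1 ++ PySem.List.pyGetD ((PySem.List.pyRange 0 ((sites.length : Int) - 1) 1).map (fun m =>
            if m == 0 then PySem.List.slice seq (some 0) (some (PySem.List.pyGetD sites 1 0 + 1))
            else PySem.List.slice seq (some (PySem.List.pyGetD sites m 0 + 1)) (some (PySem.List.pyGetD sites (m + 1) 0 + 1)))) (i + j) []),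
         if minl ≤ ((st.1 ++ PySem.List.pyGetD ((PySem.List.pyRange 0 ((sites.length : Int) - 1) 1).map (fun m =>
            if m == 0 then PySem.List.slice seq (some 0) (some (PySem.List.pyGetD sites 1 0 + 1))
            else PySem.List.slice seq (some (PySem.List.pyGetD sites m 0 + 1)) (some (PySem.List.pyGetD sites (m + 1) 0 + 1)))) (i + j) []).length : Int)
         then st.2 ++ [String.mk (st.1 ++ PySem.List.pyGetD ((PySem.List.pyRange 0 ((sites.length : Int) - 1) 1).map (fun m =>
            if m == 0 then PySem.List.slice seq (some 0) (some (PySem.List.pyGetD sites 1 0 + 1))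
            else PySem.List.slice seq (some (PySem.List.pyGetD sites m 0 + 1)) (some (PySem.List.pyGetD sites (m + 1) 0 + 1)))) (i + j) [])]
         else st.2)) (([] : List Char), peps)
    = ((if m = 0 then ([] : List Char) else pvP seq sites i ((m : Int) - 1)),
       (PySem.List.pyRange 0 (m : Int) 1).foldl (pvStepC seq sites minl i) peps) := by
  intro m
  induction m with
  | zero => intro _; rfl
  | succ m ih =>
    intro hm
    have hmM : (m : Int) ≤ M := by push_cast at hm ⊢; omega
    have hcast : ((m + 1 : Nat) : Int) = (m : Int) + 1 := by push_cast; ring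
    rw [hcast, PySem.List.pyRange_one_succ_right (by positivity), List.foldl_append,
      List.foldl_append, ih hmM]
    simp only [List.foldl]
    have hidx : PySem.List.pyGetD ((PySem.List.pyRange 0 ((sites.length : Int) - 1) 1).map (fun m =>
            if m == 0 then PySem.List.slice seq (some 0) (some (PySem.List.pyGetD sites 1 0 + 1))
            else PySem.List.slice seq (some (PySem.List.pyGetD sites m 0 + 1)) (some (PySem.List.pyGetD sites (m + 1) 0 + 1)))) (i + (m : Int)) []
        = pvFrag seq sites (i + (m : Int)) :=
      pvFrag_index seq sites _ (by positivity) (by omega)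
    have hacc : (if m = 0 then ([] : List Char) else pvP seq sites i ((m : Int) - 1)) ++ pvFrag seq sites (i + (m : Int))
        = pvP seq sites i (m : Int) := by
      by_cases hm0 : m = 0
      · subst hm0
        have h0 : (if (0 : Nat) = 0 then ([] : List Char) else pvP seq sites i (((0 : Nat) : Int) - 1)) = [] := by simp
        rw [h0, List.nil_append, Nat.cast_zero, add_zero]
        unfold pvFrag pvP
        by_cases hi0 : i = 0
        · subst hi0
          rw [if_pos rfl, if_pos rfl, show (0 : Int) + 1 + 0 = 1 by ring]
        · rw [if_neg hi0, if_neg hi0, show i + 1 + 0 = i + 1 by ring]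
      · rw [if_neg hm0]
        have he : i + (m : Int) = i + ((m : Int) - 1) + 1 := by omega
        rw [he, pvP_extend seq sites hg i ((m : Int) - 1) hi (by omega) (by omega)]
        rw [show (m : Int) - 1 + 1 = (m : Int) by ring]
    rw [hidx, hacc]
    simp only [Prod.mk.injEq]
    refine ⟨?_, ?_⟩
    · rw [if_neg (Nat.succ_ne_zero m), show ((m : Int) + 1 - 1) = (m : Int) by ring]
    · unfold pvStepC
      rfl


lemma pvPepsA_reduce (seq : List Char) (mm minl : Int) (cleavs : List String) :
    pvPepsA seq mm minl cleavs
      = (PySem.List.pyRange 0 (((pvSites seq cleavs).length : Int) - 1) 1).foldl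
          (fun peps i => pvInnerC seq (pvSites seq cleavs) mm minl i peps) [] := by
  have hN : 1 ≤ ((pvSites seq cleavs).length : Int) := by
    have := List.length_pos_iff.mpr (pvSites_ne_nil seq cleavs)
    omega
  set sites := pvSites seq cleavs with hsites
  simp only [pvPepsA]
  rw [← hsites]
  rw [PySem.List.enumerate_eq_map_pyRange sites 0, List.foldl_map]
  simp only [PySem.List.len_eq]
  have hsplit : PySem.List.pyRange 0 ((sites.length : Int)) 1
      = PySem.List.pyRange 0 ((sites.length : Int) - 1) 1 ++ [(sites.length : Int) - 1] := by
    have h := PySem.List.pyRange_one_succ_right (a := 0) (b := (sites.length : Int) - 1) (by omega)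
    rw [show (sites.length : Int) - 1 + 1 = (sites.length : Int) by ring] at h
    exact h
  rw [hsplit, List.foldl_append]
  simp only [List.foldl_cons, List.foldl_nil]
  rw [pvInnerA_eq seq sites mm minl ((sites.length : Int) - 1) (by omega) (by omega)]
  rw [pvInnerC, show PySem.List.pyRange 0
        (min (mm + 1) ((sites.length : Int) - 1 - ((sites.length : Int) - 1))) 1 = []
      from PySem.List.pyRange_one_eq_nil (by omega), List.foldl_nil]
  apply PySem.List.foldl_congr_mem
  intro acc i hi
  have hii := PySem.List.mem_pyRange_one.mp hi
  exact pvInnerA_eq seq sites mm minl i (by omega) (by omega) acc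

lemma pvPepsB_reduce (seq : List Char) (mm minl : Int) (cleavs : List String) :
    pvPepsB seq mm minl cleavs
      = (PySem.List.pyRange 0 (((pvSites seq cleavs).length : Int) - 1) 1).foldl
          (fun peps i => pvInnerC seq (pvSites seq cleavs) mm minl i peps) [] := by
  have hg := pvSites_good seq cleavs
  have hN : 1 ≤ ((pvSites seq cleavs).length : Int) := by
    have := pvSites_ne_nil seq cleavs
    have := List.length_pos_iff.mpr this
    omega
  set sites := pvSites seq cleavs with hsites
  have hflen : (((PySem.List.pyRange 0 ((sites.length : Int) - 1) 1).map (fun m =>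
      if m == 0 then PySem.List.slice seq (some 0) (some (PySem.List.pyGetD sites 1 0 + 1))
      else PySem.List.slice seq (some (PySem.List.pyGetD sites m 0 + 1)) (some (PySem.List.pyGetD sites (m + 1) 0 + 1)))).length : Int)
      = (sites.length : Int) - 1 := by
    rw [List.length_map, PySem.List.length_pyRange_one]
    omega
  simp only [pvPepsB]
  rw [← hsites]
  simp only [hflen]
  apply PySem.List.foldl_congr_mem
  intro acc i hi
  have hii := PySem.List.mem_pyRange_one.mp hi
  by_cases hM : min (mm + 1) ((sites.length : Int) - 1 - i) < 0
  · rw [show PySem.List.pyRange 0 (min (mm + 1) ((sites.length : Int) - 1 - i)) 1 = []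
        from PySem.List.pyRange_one_eq_nil (by omega)]
    rw [pvInnerC, show PySem.List.pyRange 0 (min (mm + 1) ((sites.length : Int) - 1 - i)) 1 = []
        from PySem.List.pyRange_one_eq_nil (by omega)]
    rfl
  · have hM0 : 0 ≤ min (mm + 1) ((sites.length : Int) - 1 - i) := by omega
    have hcast : ((min (mm + 1) ((sites.length : Int) - 1 - i)).toNat : Int)
        = min (mm + 1) ((sites.length : Int) - 1 - i) := by omega
    have := pvInnerB_inv seq sites hg minl i (by omega)
      (min (mm + 1) ((sites.length : Int) - 1 - i)) (min_le_right _ _) acc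
      (min (mm + 1) ((sites.length : Int) - 1 - i)).toNat (by omega)
    rw [hcast] at this
    rw [this, pvInnerC]

lemma pvPeps_eq (seq : List Char) (mm minl : Int) (cleavs : List String) :
    pvPepsA seq mm minl cleavs = pvPepsB seq mm minl cleavs := by
  rw [pvPepsA_reduce, pvPepsB_reduce]

-- ===== VERDICT (by name: the statement is the Claim_ definition above) =====
theorem enzyme_specific_spec : Claim_equal_enzyme_specific := by
  intro m mm ml cl t _
  unfold Spec_enzyme_specific enzyme_specific enzyme_specific_alt
  simp only [pvPeps_eq]
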